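-- pv_equiv track=rewrite | github.com/SanthiyaBaskar/TIQ-HR-Analytics | streamlit_app/app.py | job_keywords
-- ===== SOURCE A (Python) =====
-- def job_keywords(desc, top_n=5):
--     tokens = [t.strip(".,()[]:;\"'").lower() for t in desc.split() if len(t)>3]
--     seen = []
--     for t in tokens:
--         if t not in seen:
--             seen.append(t)
--         if len(seen) >= top_n:
--             break
--     return seen
-- ===== SOURCE B (Python) =====
-- def job_keywords(desc, top_n=5):
--     tokens = [t.strip(".,()[]:;\"'").lower() for t in desc.split() if len(t) > 3]
--
--     def uniq(ts):
--         # filter-out-head recursion: keep the head, delete all its later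
--         # duplicates from the tail, recurse on what remains
--         if not ts:
--             return []
--         h = ts[0]
--         return [h] + uniq([x for x in ts[1:] if x != h])
--
--     return uniq(tokens)[:top_n]
-- ===== Notes on version B (the rewrite author's own statement) =====
-- stated objective: alternative
-- what changed: A's single-pass accumulator loop (seen list, in-loop membership test, early break) is replaced by a filter-out-head recursion that removes duplicates by deleting each head's later occurrences from the tail (no seen structure at all), followed by a slice [:top_n].
-- intended difference: When top_n <= 0 and the description contains a word longer than 3 characters, A returns a list holding the first keyword (its break test runs only after appending), while B returns the slice [:top_n] (empty); returning at most top_n keywords is the intended behaviour. — e.g. on job_keywords("alpha beta", 0): A returns ["alpha"], B returns []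
import Mathlib
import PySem

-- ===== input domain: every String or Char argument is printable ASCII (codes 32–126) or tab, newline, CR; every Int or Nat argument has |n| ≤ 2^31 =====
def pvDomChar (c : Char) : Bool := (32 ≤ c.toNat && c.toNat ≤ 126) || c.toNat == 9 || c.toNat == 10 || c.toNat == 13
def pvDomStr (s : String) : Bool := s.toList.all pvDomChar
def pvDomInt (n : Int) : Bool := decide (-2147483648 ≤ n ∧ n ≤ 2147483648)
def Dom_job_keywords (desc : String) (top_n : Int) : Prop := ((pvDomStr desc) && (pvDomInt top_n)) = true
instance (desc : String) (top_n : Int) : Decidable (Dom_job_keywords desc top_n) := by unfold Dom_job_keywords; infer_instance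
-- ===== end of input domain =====

-- B replaces A's early-exit seen-list accumulation by a filter-out-head recursion (no seen structure) plus a slice (alternative decomposition).

-- ===== PORT A =====
-- the 'for t in tokens' loop with the in-loop membership test and early break
def jkLoop (top_n : Int) : List String → List String → List String
  | seen, [] => seen
  | seen, t :: ts =>
      let seen' := if t ∈ seen then seen else seen ++ [t]
      if top_n ≤ (seen'.length : Int) then seen' else jkLoop top_n seen' ts

def job_keywords (desc : String) (top_n : Int) : List String :=
  let tokens := ((PySem.Str.split₀ desc).filter (fun t => 3 < PySem.Str.len t)).map
                  (fun t => PySem.Str.lower (PySem.Str.stripChars t ".,()[]:;\"'"))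
  jkLoop top_n [] tokens

-- ===== PORT B =====
-- Source B's uniq: keep the head, filter its duplicates out of the tail, recurse
def jkUniq : List String → List String
  | [] => []
  | h :: ts => h :: jkUniq (ts.filter (fun x => x ≠ h))
termination_by ts => ts.length
decreasing_by
  simp only [List.length_unattach, List.length_cons]
  exact Nat.lt_succ_of_le (le_trans (List.length_filter_le _ _) (by simp))

def job_keywords_alt (desc : String) (top_n : Int) : List String :=
  let tokens := ((PySem.Str.split₀ desc).filter (fun t => 3 < PySem.Str.len t)).map
                  (fun t => PySem.Str.lower (PySem.Str.stripChars t ".,()[]:;\"'"))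
  PySem.List.slice (jkUniq tokens) none (some top_n)

-- ===== PRECONDITION & SPEC =====
-- When top_n ≤ 0 and desc contains a word longer than 3 characters, A returns a one-keyword list
-- (its break test runs only after appending) while B returns the slice [:top_n] (empty);
-- returning at most top_n keywords is the intended behaviour.
def D_job_keywords (desc : String) (top_n : Int) : Prop :=
  top_n ≤ 0 ∧ ∃ t ∈ PySem.Str.split₀ desc, 3 < PySem.Str.len t
instance (desc : String) (top_n : Int) : Decidable (D_job_keywords desc top_n) := by
  unfold D_job_keywords; infer_instance

def Spec_job_keywords (desc : String) (top_n : Int) (out : List String) : Prop :=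
  ¬ D_job_keywords desc top_n → out = job_keywords_alt desc top_n
instance (desc : String) (top_n : Int) (out : List String) : Decidable (Spec_job_keywords desc top_n out) := by
  unfold Spec_job_keywords; infer_instance

def pvDiffWitness_job_keywords : String × Int := ("alpha beta", 0)
def pvDiffWitnessOut_job_keywords : (List String) × (List String) := (["alpha"], [])

-- ===== CLAIM (what is proved, stated in full; the proofs are below) =====
def Claim_unchanged_job_keywords : Prop := ∀ (desc : String) (top_n : Int), Dom_job_keywords desc top_n → Spec_job_keywords desc top_n (job_keywords desc top_n)
def Claim_changed_job_keywords : Prop := Dom_job_keywords (pvDiffWitness_job_keywords.1) (pvDiffWitness_job_keywords.2) ∧ D_job_keywords (pvDiffWitness_job_keywords.1) (pvDiffWitness_job_keywords.2) ∧ job_keywords (pvDiffWitness_job_keywords.1) (pvDiffWitness_job_keywords.2) = pvDiffWitnessOut_job_keywords.1 ∧ job_keywords_alt (pvDiffWitness_job_keywords.1) (pvDiffWitness_job_keywords.2) = pvDiffWitnessOut_job_keywords.2 ∧ pvDiffWitnessOut_job_keywords.1 ≠ pvDiffWitnessOut_job_keywords.2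

-- ===== LEMMAS AND PROOFS =====

theorem jkUniq_cons (h : String) (ts : List String) :
    jkUniq (h :: ts) = h :: jkUniq (ts.filter (fun x => x ≠ h)) := by
  rw [jkUniq.eq_def]

theorem jk_prefix_foldl_add (ts : List String) : ∀ (seen : List String),
    seen <+: ts.foldl PySem.Set.add seen := by
  induction ts with
  | nil => intro seen; simp
  | cons t ts ih =>
      intro seen
      refine List.IsPrefix.trans ?_ (ih (PySem.Set.add seen t))
      simp [PySem.Set.add]
      split <;> simp

theorem jk_add_length (seen : List String) (t : String) :
    (PySem.Set.add seen t).length = seen.length ∨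
    (PySem.Set.add seen t).length = seen.length + 1 := by
  simp [PySem.Set.add]; split <;> simp

theorem jk_seen'_eq_add (seen : List String) (t : String) :
    (if t ∈ seen then seen else seen ++ [t]) = PySem.Set.add seen t := by
  simp [PySem.Set.add, PySem.Set.contains]

theorem jkLoop_eq (n : Int) (ts : List String) : ∀ (seen : List String),
    (seen.length : Int) < n →
    jkLoop n seen ts = (ts.foldl PySem.Set.add seen).take n.toNat := by
  induction ts with
  | nil =>
      intro seen h
      simp only [jkLoop, List.foldl_nil]
      exact (List.take_of_length_le (by omega)).symm
  | cons t ts ih =>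
      intro seen h
      rw [jkLoop, jk_seen'_eq_add]
      by_cases hb : n ≤ ((PySem.Set.add seen t).length : Int)
      · rw [if_pos hb]
        have hlen := jk_add_length seen t
        have hn : (PySem.Set.add seen t).length = n.toNat := by omega
        have hpre := jk_prefix_foldl_add ts (PySem.Set.add seen t)
        have := (List.prefix_iff_eq_take.mp hpre)
        simpa [hn] using this
      · rw [if_neg hb]
        exact ih (PySem.Set.add seen t) (by omega)

-- A's foldl over any seen equals seen ++ the filter-out-head dedup of the unseen part
theorem jk_foldl_eq_uniq (ts : List String) : ∀ (seen : List String),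
    ts.foldl PySem.Set.add seen = seen ++ jkUniq (ts.filter (fun x => x ∉ seen)) := by
  induction ts with
  | nil => intro seen; simp [jkUniq.eq_def]
  | cons t ts ih =>
      intro seen
      by_cases ht : t ∈ seen
      · simp only [List.foldl_cons, List.filter_cons]
        rw [show PySem.Set.add seen t = seen by simp [PySem.Set.add, PySem.Set.contains, ht]]
        simp [ht, ih seen]
      · simp only [List.foldl_cons, List.filter_cons]
        rw [show PySem.Set.add seen t = seen ++ [t] by simp [PySem.Set.add, PySem.Set.contains, ht]]
        rw [ih (seen ++ [t])]
        simp only [ht, decide_not, decide_false, Bool.not_false, if_true]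
        rw [jkUniq_cons]
        have hf : ts.filter (fun x => decide (x ∉ seen ++ [t]))
            = (ts.filter (fun x => decide (x ∉ seen))).filter (fun x => decide (x ≠ t)) := by
          rw [List.filter_filter]
          apply List.filter_congr
          intro x _
          by_cases hx : x ∈ seen <;> by_cases hxt : x = t <;> simp [hx, hxt]
        rw [show (ts.filter fun x => !decide (x ∈ seen ++ [t])) = ts.filter (fun x => decide (x ∉ seen ++ [t])) by simp]
        rw [hf]
        simp

theorem jkLoop_eq_uniq_take (n : Int) (ts : List String) (h : 0 < n) :
    jkLoop n [] ts = (jkUniq ts).take n.toNat := by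
  have := jkLoop_eq n ts [] (by simpa using h)
  simpa [jk_foldl_eq_uniq ts []] using this

-- ===== VERDICT (by name: the statement is the Claim_ definition above) =====
theorem job_keywords_spec : Claim_unchanged_job_keywords := by
  intro desc top_n _ hD
  unfold job_keywords job_keywords_alt
  by_cases hn : 0 < top_n
  · rw [jkLoop_eq_uniq_take top_n _ hn, PySem.List.slice_to _ (by omega)]
  · -- top_n ≤ 0 and, since ¬D, no word longer than 3 characters: the token list is empty
    have hempty : (PySem.Str.split₀ desc).filter (fun t => 3 < t.length) = [] := by
      rw [List.filter_eq_nil_iff]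
      intro t ht
      by_contra hlen
      refine hD ⟨by omega, t, ht, ?_⟩
      simp only [PySem.Str.len, String.length_toList]
      simp at hlen
      omega
    simp [hempty, jkLoop, jkUniq, PySem.List.slice]

theorem job_keywords_changed : Claim_changed_job_keywords := by
  unfold Claim_changed_job_keywords; decide
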